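-- pv_equiv track=rewrite | github.com/Nghia03092004/nghia03092004.github.io | project_euler_unified/problem_494/solution.py | count_prefix_families
-- ===== SOURCE A (Python) =====
-- def collatz_step(n: int):
--     """Single Collatz step."""
--     if n % 2 == 0:
--         return n // 2
--     else:
--         return 3 * n + 1
--
-- def collatz_prefix(n: int, k: int):
--     """Return the first k values of the Collatz sequence starting at n."""
--     seq = [n]
--     val = n
--     for _ in range(k - 1):
--         val = collatz_step(val)
--         seq.append(val)
--     return tuple(seq)
--
-- def count_prefix_families(N: int, K: int) -> list:
--     """Count the number of distinct prefix families for each length k=1..K.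
--
--     A prefix family of length k groups all starting values in [1, N]
--     whose Collatz sequences share the same first k values.
--     """
--     family_counts = []
--     for k in range(1, K + 1):
--         families = set()
--         for n in range(1, N + 1):
--             prefix = collatz_prefix(n, k)
--             families.add(prefix)
--         family_counts.append(len(families))
--     return family_counts
-- ===== SOURCE B (Python) =====
-- def count_prefix_families(N: int, K: int) -> list:
--     """Count the number of distinct prefix families for each length k=1..K.
--
--     Each length-k prefix starts with its own starting value n, so the N
--     prefixes are pairwise distinct and every length has exactly max(N,0)
--     families: closed form, no Collatz simulation needed.
--     """
--     return [max(N, 0)] * max(K, 0)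
-- ===== Notes on version B (the rewrite author's own statement) =====
-- stated objective: faster
-- what changed: B replaces the nested Collatz-prefix enumeration with the closed form [max(N,0)]*max(K,0), justified by the fact that every length-k prefix starts with its own n so all N prefixes are distinct.
import Mathlib
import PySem

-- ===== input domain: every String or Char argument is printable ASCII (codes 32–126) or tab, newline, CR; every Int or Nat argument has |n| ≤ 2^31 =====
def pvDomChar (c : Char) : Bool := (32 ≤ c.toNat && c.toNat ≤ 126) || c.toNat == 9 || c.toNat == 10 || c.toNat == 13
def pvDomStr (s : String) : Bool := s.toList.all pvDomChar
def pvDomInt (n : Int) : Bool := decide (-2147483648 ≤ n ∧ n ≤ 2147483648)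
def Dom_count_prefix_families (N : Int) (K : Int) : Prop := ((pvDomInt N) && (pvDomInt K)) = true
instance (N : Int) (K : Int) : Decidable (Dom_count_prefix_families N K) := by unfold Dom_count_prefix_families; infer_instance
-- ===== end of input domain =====

-- B replaces A's nested Collatz-prefix enumeration with the closed form [max(N,0)] * max(K,0) (faster).

-- ===== PORT A =====
def collatz_step (n : Int) : Int :=
  if PySem.Int.mod n 2 = 0 then PySem.Int.floordiv n 2 else 3 * n + 1

def collatz_prefix (n : Int) (k : Int) : List Int :=
  ((PySem.List.pyRange 0 (k - 1) 1).foldl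
    (fun (st : List Int × Int) _ =>
      let v := collatz_step st.2
      (st.1 ++ [v], v)) ([n], n)).1

def count_prefix_families (N : Int) (K : Int) : List Int :=
  (PySem.List.pyRange 1 (K + 1) 1).foldl
    (fun (family_counts : List Int) k =>
      let families : PySem.Set (List Int) :=
        (PySem.List.pyRange 1 (N + 1) 1).foldl
          (fun s n => PySem.Set.add s (collatz_prefix n k)) PySem.Set.empty
      family_counts ++ [PySem.Set.len families]) []

-- ===== PORT B =====
def count_prefix_families_alt (N : Int) (K : Int) : List Int :=
  List.replicate (max K 0).toNat (max N 0)

-- ===== PRECONDITION & SPEC =====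
def Spec_count_prefix_families (N : Int) (K : Int) (out : List Int) : Prop := out = count_prefix_families_alt N K
instance (N : Int) (K : Int) (out : List Int) : Decidable (Spec_count_prefix_families N K out) := by unfold Spec_count_prefix_families; infer_instance

-- ===== CLAIM (what is proved, stated in full; the proofs are below) =====
def Claim_equal_count_prefix_families : Prop := ∀ (N : Int) (K : Int), Dom_count_prefix_families N K → Spec_count_prefix_families N K (count_prefix_families N K)

-- ===== LEMMAS AND PROOFS =====

-- the prefix-building fold keeps the head of the sequence
theorem prefix_fold_head (l : List Int) : ∀ (n : Int) (s : List Int) (v : Int),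
    ((l.foldl (fun (st : List Int × Int) _ =>
      let w := collatz_step st.2
      (st.1 ++ [w], w)) (n :: s, v)).1).head? = some n := by
  induction l with
  | nil => intro n s v; simp
  | cons a l ih =>
      intro n s v
      simpa [List.cons_append] using ih n (s ++ [collatz_step v]) (collatz_step v)

theorem collatz_prefix_head (n k : Int) : (collatz_prefix n k).head? = some n := by
  unfold collatz_prefix
  exact prefix_fold_head _ n [] n

theorem collatz_prefix_inj (n m k : Int) (h : n ≠ m) :
    collatz_prefix n k ≠ collatz_prefix m k := by
  intro he
  have := collatz_prefix_head n k
  rw [he, collatz_prefix_head m k] at this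
  exact h (Option.some.inj this.symm)

-- adding images of a nodup list under an injective map appends them all
theorem add_fold_fresh {α : Type} [BEq α] [LawfulBEq α] (f : Int → α) (l : List Int)
    (hinj : ∀ x ∈ l, ∀ y ∈ l, f x = f y → x = y) (hl : l.Nodup) :
    ∀ (s : PySem.Set α), (∀ x ∈ l, f x ∉ s) →
      l.foldl (fun s x => PySem.Set.add s (f x)) s = s ++ l.map f := by
  induction l with
  | nil => intro s _; simp
  | cons a l ih =>
      intro s hs
      have ha : f a ∉ s := hs a (by simp)
      have hadd : PySem.Set.add s (f a) = s ++ [f a] := by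
        simp [PySem.Set.add]
        intro hmem; exact absurd hmem ha
      simp only [List.foldl_cons, hadd]
      rw [ih (fun x hx y hy => hinj x (by simp [hx]) y (by simp [hy]))
        (List.Nodup.of_cons hl) (s ++ [f a])]
      · simp
      · intro x hx
        simp only [List.mem_append, List.mem_singleton]
        rintro (h1 | h2)
        · exact hs x (by simp [hx]) h1
        · have : x = a := hinj x (by simp [hx]) a (by simp) h2
          subst this
          exact (List.nodup_cons.mp hl).1 hx

theorem inner_fold (N k : Int) :
    (PySem.List.pyRange 1 (N + 1) 1).foldl
      (fun s n => PySem.Set.add s (collatz_prefix n k)) PySem.Set.empty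
    = (PySem.List.pyRange 1 (N + 1) 1).map (fun n => collatz_prefix n k) := by
  have := add_fold_fresh (fun n => collatz_prefix n k) (PySem.List.pyRange 1 (N + 1) 1)
    (fun x _ y _ hxy => by
      by_contra hne
      exact collatz_prefix_inj x y k hne hxy)
    (PySem.List.nodup_pyRange_one 1 (N + 1))
    PySem.Set.empty (by intro x _ hx; simp [PySem.Set.empty] at hx)
  simpa [PySem.Set.empty] using this

-- a fold that appends one element per item is a map
theorem foldl_append_map {α β : Type} (g : α → β) (l : List α) :
    ∀ (acc : List β), l.foldl (fun acc x => acc ++ [g x]) acc = acc ++ l.map g := by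
  induction l with
  | nil => intro acc; simp
  | cons a l ih => intro acc; simp [ih]

-- ===== VERDICT (by name: the statement is the Claim_ definition above) =====
theorem count_prefix_families_spec : Claim_equal_count_prefix_families := by
  intro N K _
  unfold Spec_count_prefix_families count_prefix_families count_prefix_families_alt
  rw [foldl_append_map]
  simp only [inner_fold, List.nil_append]
  have hlen : ∀ k : Int, PySem.Set.len
      ((PySem.List.pyRange 1 (N + 1) 1).map (fun n => collatz_prefix n k)) = max N 0 := by
    intro k
    simp [PySem.Set.len, PySem.List.length_pyRange_one]
  calc (PySem.List.pyRange 1 (K + 1) 1).map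
        (fun k => PySem.Set.len ((PySem.List.pyRange 1 (N + 1) 1).map (fun n => collatz_prefix n k)))
      = (PySem.List.pyRange 1 (K + 1) 1).map (fun _ => max N 0) := by
        exact List.map_congr_left (fun k _ => hlen k)
    _ = List.replicate (max K 0).toNat (max N 0) := by
        rw [List.map_const']
        congr 1
        rw [PySem.List.length_pyRange_one]
        omega
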